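-- pv_equiv track=rewrite | github.com/shashivardhan2004/SecureComputingSystems | SecureComputingSystems/SecureComputingSystems/Task2/task2.py | count_ips
-- ===== SOURCE A (Python) =====
-- def count_ips(ip_list):
--     ip_count = {}
--
--     for ip in ip_list:
--         if ip in ip_count:
--             ip_count[ip] += 1
--         else:
--             ip_count[ip] = 1
--
--     return ip_count
-- ===== SOURCE B (Python) =====
-- def count_ips(ip_list):
--     # Two staged passes: dedup the keys in first-occurrence order, then count each key.
--     return {ip: ip_list.count(ip) for ip in dict.fromkeys(ip_list)}
-- ===== Notes on version B (the rewrite author's own statement) =====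
-- stated objective: alternative
-- what changed: B does no incremental counting at all: it first deduplicates the list (dict.fromkeys, keeping first-occurrence order) and then, in a second stage, maps each distinct IP to ip_list.count(ip); A's conditional counter updates inside a single loop disappear.
import Mathlib
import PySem

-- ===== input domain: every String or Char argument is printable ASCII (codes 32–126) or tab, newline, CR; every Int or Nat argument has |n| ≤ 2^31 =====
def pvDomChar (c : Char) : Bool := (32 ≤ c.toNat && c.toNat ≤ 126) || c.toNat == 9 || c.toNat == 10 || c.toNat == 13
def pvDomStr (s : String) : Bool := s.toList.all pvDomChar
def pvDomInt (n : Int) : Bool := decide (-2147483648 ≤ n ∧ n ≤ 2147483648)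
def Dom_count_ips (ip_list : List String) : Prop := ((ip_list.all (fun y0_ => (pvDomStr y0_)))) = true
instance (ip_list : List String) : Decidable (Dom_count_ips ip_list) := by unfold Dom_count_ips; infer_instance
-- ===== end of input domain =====

-- B replaces A's single counting loop by two stages: dedup the keys (dict.fromkeys), then count each distinct key with list.count; objective: alternative.

-- ===== PORT A =====
def count_ips (ip_list : List String) : List (String × Int) :=
  (ip_list.foldl (fun ip_count ip =>
      if ip_count.contains ip then ip_count.modify ip 0 (· + 1)
      else ip_count.insert ip 1) PySem.Dict.empty).items

-- ===== PORT B =====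
def count_ips_alt (ip_list : List String) : List (String × Int) :=
  -- {ip: ip_list.count(ip) for ip in dict.fromkeys(ip_list)}
  ((PySem.List.dedup ip_list).foldl
      (fun d ip => d.insert ip ((PySem.List.count ip_list ip : Nat) : Int))
      PySem.Dict.empty).items

-- ===== PRECONDITION & SPEC =====
def Spec_count_ips (ip_list : List String) (out : List (String × Int)) : Prop := out = count_ips_alt ip_list
instance (ip_list : List String) (out : List (String × Int)) : Decidable (Spec_count_ips ip_list out) := by unfold Spec_count_ips; infer_instance

-- ===== CLAIM (what is proved, stated in full; the proofs are below) =====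
def Claim_equal_count_ips : Prop := ∀ (ip_list : List String), Dom_count_ips ip_list → Spec_count_ips ip_list (count_ips ip_list)

-- ===== LEMMAS AND PROOFS =====

-- A's loop body equals Counter's step: on a missing key, insert 1 = modify with default 0 then +1.
lemma stepA_eq_counter_step (d : PySem.Dict String Int) (x : String) :
    (if d.contains x then d.modify x 0 (· + 1) else d.insert x 1) = d.modify x 0 (· + 1) := by
  by_cases h : d.contains x = true
  · simp [h]
  · simp only [Bool.not_eq_true] at h
    simp [h, PySem.Dict.insert, PySem.Dict.modify, PySem.Dict.getD_of_not_contains (h := h)]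

lemma count_ips_eq_counter_items (xs : List String) :
    count_ips xs = ((PySem.Set.ofList xs).map (fun k => (k, (List.count k xs : Int)))) := by
  unfold count_ips
  rw [PySem.List.foldl_congr_mem _ _ (fun d x => d.modify x 0 (· + 1)) _
        (fun acc x _ => stepA_eq_counter_step acc x)]
  rw [← PySem.Dict.counter_eq_foldl, PySem.Dict.items_counter]

lemma count_ips_alt_eq (xs : List String) :
    count_ips_alt xs = ((PySem.Set.ofList xs).map (fun k => (k, (List.count k xs : Int)))) := by
  unfold count_ips_alt
  have h := PySem.Dict.items_foldl_insert_fresh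
      (l := PySem.List.dedup xs)
      (k := fun p => p) (v := fun p => ((PySem.List.count xs p : Nat) : Int))
      (d := (PySem.Dict.empty : PySem.Dict String Int))
      (by intro a _; simp)
      (by simp)
  rw [h]
  simp [PySem.Dict.empty, PySem.List.count_eq]

-- ===== VERDICT (by name: the statement is the Claim_ definition above) =====
theorem count_ips_spec : Claim_equal_count_ips := by
  intro ip_list _
  unfold Spec_count_ips
  rw [count_ips_eq_counter_items, count_ips_alt_eq]
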